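-- pv_equiv track=rewrite | github.com/SergioAle210/Syntax-Par | lex/yalex_utils.py | convert_char_literals_to_ascii
-- ===== SOURCE A (Python) =====
-- def convert_char_literals_to_ascii(regex: str) -> str:
--     """
--     Recorre la expresión regular y reemplaza las literales de caracteres (entre comillas o literales puntuales)
--     por su valor ASCII, sin usar funciones como .strip o .find.
--     Por ejemplo: "'A'" se reemplaza por "65" y un punto '.' se reemplaza por "46".
--     """
--     output = ""
--     i = 0
--     while i < len(regex):
--         c = regex[i]
--         if c == "'" or c == '"':
--             quote_char = c
--             i += 1  # Saltar la comilla de apertura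
--             literal = ""
--             # Extraer el contenido hasta la comilla de cierre
--             while i < len(regex) and regex[i] != quote_char:
--                 if regex[i] == "\\" and i + 1 < len(regex):
--                     literal += regex[i] + regex[i + 1]
--                     i += 2
--                 else:
--                     literal += regex[i]
--                     i += 1
--             if i < len(regex) and regex[i] == quote_char:
--                 i += 1  # Saltar la comilla de cierre
--             # Decodificar el literal (interpreta secuencias de escape simples)
--             if len(literal) >= 1 and literal[0] == "\\" and len(literal) > 1:
--                 esc = literal[1]
--                 if esc == "n":
--                     decoded = "\n"
--                 elif esc == "t":
--                     decoded = "\t"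
--                 elif esc == "r":
--                     decoded = "\r"
--                 elif esc in ("'", '"', "\\"):
--                     decoded = esc
--                 else:
--                     decoded = literal[1]
--             else:
--                 decoded = literal[0] if len(literal) > 0 else ""
--             if decoded != "":
--                 output += str(ord(decoded))
--         elif c == ".":  # Si el carácter es un punto, lo convertimos a ASCII (46)
--             output += str(ord("."))
--             i += 1
--         else:
--             output += c
--             i += 1
--     return output
-- ===== SOURCE B (Python) =====
-- def _decode(buf):
--     # A's decode rule: leading backslash with more chars -> escape map (n/t/r, else the char itself);
--     # otherwise first char; empty literal emits nothing.
--     if buf == "":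
--         return ""
--     if buf[0] == "\\" and len(buf) > 1:
--         e = buf[1]
--         d = {"n": "\n", "t": "\t", "r": "\r"}.get(e, e)
--         return str(ord(d))
--     return str(ord(buf[0]))
--
--
-- def convert_char_literals_to_ascii(regex: str) -> str:
--     NORMAL, IN_QUOTE, ESCAPE = 0, 1, 2
--     state = NORMAL
--     quote = ""
--     buf = ""
--     out = []
--     for c in regex:
--         if state == NORMAL:
--             if c == "'" or c == '"':
--                 state, quote, buf = IN_QUOTE, c, ""
--             elif c == ".":
--                 out.append("46")
--             else:
--                 out.append(c)
--         elif state == IN_QUOTE: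
--             if c == quote:
--                 out.append(_decode(buf))
--                 state = NORMAL
--             elif c == "\\":
--                 buf += c
--                 state = ESCAPE
--             else:
--                 buf += c
--         else:  # ESCAPE
--             buf += c
--             state = IN_QUOTE
--     if state != NORMAL:
--         out.append(_decode(buf))
--     return "".join(out)
-- ===== Notes on version B (the rewrite author's own statement) =====
-- stated objective: idiomatic
-- what changed: Replaced A's index-driven outer while-loop with nested literal-extraction while-loop by a single for-loop over the characters carrying an explicit NORMAL/IN_QUOTE/ESCAPE state, a buffer and the active quote char, with a factored-out decode helper; output collected in a list and joined once instead of repeated string concatenation.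
import Mathlib
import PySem

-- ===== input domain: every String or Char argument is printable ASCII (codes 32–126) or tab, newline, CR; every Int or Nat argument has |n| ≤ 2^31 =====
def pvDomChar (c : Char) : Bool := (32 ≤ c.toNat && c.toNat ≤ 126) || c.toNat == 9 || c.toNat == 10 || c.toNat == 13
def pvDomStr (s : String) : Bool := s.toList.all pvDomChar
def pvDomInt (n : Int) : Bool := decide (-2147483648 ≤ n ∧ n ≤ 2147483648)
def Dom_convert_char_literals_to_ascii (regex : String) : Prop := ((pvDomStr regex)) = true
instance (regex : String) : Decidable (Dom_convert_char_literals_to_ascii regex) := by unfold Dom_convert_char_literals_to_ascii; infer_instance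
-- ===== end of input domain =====

-- B replaces A's nested index-driven while-loops by a single pass over the characters
-- carrying an explicit NORMAL/IN_QUOTE/ESCAPE state, joining the output once (the timing
-- run measured B faster: A's repeated string += is quadratic, B's list-join is linear).


-- ===== PORT A =====

-- str(ord(c))
def pyOrdStr (c : Char) : String := PySem.Int.toStr (Int.ofNat c.toNat)

-- A's decode of an extracted literal (the block after the inner while loop);
-- returns the string appended to output ("" when the literal is empty).
def aDecode (lit : List Char) : String :=
  let decoded : List Char :=
    if lit.length ≥ 1 ∧ lit.getD 0 ' ' = '\\' ∧ lit.length > 1 then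
      let esc := lit.getD 1 ' '
      if esc = 'n' then ['\n']
      else if esc = 't' then ['\t']
      else if esc = 'r' then ['\r']
      else if esc = '\'' ∨ esc = '"' ∨ esc = '\\' then [esc]
      else [lit.getD 1 ' ']
    else if lit.length > 0 then [lit.getD 0 ' '] else []
  match decoded with
  | [] => ""
  | d :: _ => pyOrdStr d

-- A's inner while loop: extracts the literal, returns (literal, final index).
-- 'fuel' is only a structural-termination guard (the loop advances i by 1 or 2 each
-- step, so any fuel ≥ cs.length - i reaches the loop's own exit conditions).
def aInner (cs : List Char) (q : Char) : Nat → Nat → List Char → List Char × Nat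
  | 0, i, lit => (lit, i)
  | fuel + 1, i, lit =>
    if i < cs.length then
      if cs.getD i ' ' = q then (lit, i)
      else if cs.getD i ' ' = '\\' ∧ i + 1 < cs.length then
        aInner cs q fuel (i + 2) (lit ++ [cs.getD i ' ', cs.getD (i + 1) ' '])
      else
        aInner cs q fuel (i + 1) (lit ++ [cs.getD i ' '])
    else (lit, i)

-- A's outer while loop ('fuel' again only a structural-termination guard).
def aLoop (cs : List Char) : Nat → Nat → String → String
  | 0, _, out => out
  | fuel + 1, i, out =>
    if i < cs.length then
      let c := cs.getD i ' '
      if c = '\'' ∨ c = '"' then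
        let r := aInner cs c cs.length (i + 1) []
        let j := if r.2 < cs.length ∧ cs.getD r.2 ' ' = c then r.2 + 1 else r.2
        aLoop cs fuel j (out ++ aDecode r.1)
      else if c = '.' then aLoop cs fuel (i + 1) (out ++ "46")
      else aLoop cs fuel (i + 1) (out ++ String.ofList [c])
    else out

def convert_char_literals_to_ascii (regex : String) : String :=
  aLoop regex.toList (regex.toList.length + 1) 0 ""

-- ===== PORT B =====

-- the state variable of B's single pass
inductive BState where
  | normal : BState
  | inQuote : Char → List Char → BState
  | escape : Char → List Char → BState
deriving DecidableEq, Repr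

-- B's str(ord(c))
def pyOrdStrB (c : Char) : String := PySem.Int.toStr (Int.ofNat c.toNat)

-- B's _decode
def bDecode (buf : List Char) : String :=
  match buf with
  | [] => ""
  | b0 :: rest =>
    if b0 = '\\' ∧ rest.length ≥ 1 then
      let e := buf.getD 1 ' '
      let d := if e = 'n' then '\n' else if e = 't' then '\t' else if e = 'r' then '\r' else e
      pyOrdStrB d
    else pyOrdStrB b0

-- B's single for-loop over the characters, plus the final flush on the [] case.
def bGo (cs : List Char) (st : BState) (out : String) : String :=
  match cs with
  | [] =>
    match st with
    | .normal => out
    | .inQuote _ buf => out ++ bDecode buf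
    | .escape _ buf => out ++ bDecode buf
  | c :: rest =>
    match st with
    | .normal =>
      if c = '\'' ∨ c = '"' then bGo rest (.inQuote c []) out
      else if c = '.' then bGo rest .normal (out ++ "46")
      else bGo rest .normal (out ++ String.ofList [c])
    | .inQuote q buf =>
      if c = q then bGo rest .normal (out ++ bDecode buf)
      else if c = '\\' then bGo rest (.escape q (buf ++ [c])) out
      else bGo rest (.inQuote q (buf ++ [c])) out
    | .escape q buf => bGo rest (.inQuote q (buf ++ [c])) out

def convert_char_literals_to_ascii_alt (regex : String) : String :=
  bGo regex.toList .normal ""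

-- ===== PRECONDITION & SPEC =====
def Spec_convert_char_literals_to_ascii (regex : String) (out : String) : Prop := out = convert_char_literals_to_ascii_alt regex
instance (regex : String) (out : String) : Decidable (Spec_convert_char_literals_to_ascii regex out) := by unfold Spec_convert_char_literals_to_ascii; infer_instance

-- ===== CLAIM (what is proved, stated in full; the proofs are below) =====
def Claim_equal_convert_char_literals_to_ascii : Prop := ∀ (regex : String), Dom_convert_char_literals_to_ascii regex → Spec_convert_char_literals_to_ascii regex (convert_char_literals_to_ascii regex)

-- ===== LEMMAS AND PROOFS =====

lemma drop_cons_getD (cs : List Char) (i : Nat) (h : i < cs.length) :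
    cs.drop i = cs.getD i ' ' :: cs.drop (i + 1) := by
  rw [List.drop_eq_getElem_cons h, List.getD_eq_getElem _ _ h]

lemma decode_eq (lit : List Char) : aDecode lit = bDecode lit := by
  match lit with
  | [] => rfl
  | [a] => simp [aDecode, bDecode, pyOrdStr, pyOrdStrB]
  | a :: b :: rest =>
    simp only [aDecode, bDecode, pyOrdStr, pyOrdStrB]
    split_ifs <;> simp_all

lemma aInner_out (cs : List Char) (q : Char) (f i : Nat) (lit : List Char)
    (h : ¬ i < cs.length) : aInner cs q f i lit = (lit, i) := by
  cases f <;> simp [aInner, h]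

lemma aLoop_out (cs : List Char) (f i : Nat) (out : String)
    (h : ¬ i < cs.length) : aLoop cs f i out = out := by
  cases f <;> simp [aLoop, h]

-- main simultaneous induction: A's outer loop from index i ≙ B in NORMAL on the suffix,
-- and A's inner loop from index i ≙ B in IN_QUOTE on the suffix (any sufficient fuels).
lemma loops_eq (n : Nat) : ∀ (cs : List Char) (i : Nat) (out : String), cs.length - i ≤ n →
    (∀ fuel, cs.length - i ≤ fuel →
      aLoop cs fuel i out = bGo (cs.drop i) .normal out) ∧
    (∀ (q : Char) (lit : List Char) (fi fo : Nat),
      cs.length - i ≤ fi → cs.length - i ≤ fo + 1 →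
      (let r := aInner cs q fi i lit
       aLoop cs fo (if r.2 < cs.length ∧ cs.getD r.2 ' ' = q then r.2 + 1 else r.2)
         (out ++ aDecode r.1)) = bGo (cs.drop i) (.inQuote q lit) out) := by
  induction n with
  | zero =>
    intro cs i out h
    have hi : ¬ i < cs.length := by omega
    have hdrop : cs.drop i = [] := List.drop_eq_nil_of_le (by omega)
    constructor
    · intro fuel _
      rw [aLoop_out cs fuel i out hi]
      simp [hdrop, bGo]
    · intro q lit fi fo _ _
      rw [aInner_out cs q fi i lit hi]
      dsimp only
      rw [if_neg (fun hc => hi hc.1), aLoop_out cs fo i _ hi]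
      simp [hdrop, bGo, decode_eq]
  | succ n ih =>
    intro cs i out h
    by_cases hi : i < cs.length
    · have hdrop := drop_cons_getD cs i hi
      constructor
      · -- NORMAL state vs A's outer loop body
        intro fuel hfuel
        obtain ⟨f, rfl⟩ : ∃ f, fuel = f + 1 := ⟨fuel - 1, by omega⟩
        rw [aLoop]
        simp only [hi, if_true, hdrop, bGo]
        by_cases hq : cs.getD i ' ' = '\'' ∨ cs.getD i ' ' = '"'
        · simp only [hq, if_true]
          exact (ih cs (i + 1) out (by omega)).2 (cs.getD i ' ') [] cs.length f
            (by omega) (by omega)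
        · simp only [hq, if_false]
          by_cases hd : cs.getD i ' ' = '.'
          · simp only [hd, if_true]
            exact (ih cs (i + 1) (out ++ "46") (by omega)).1 f (by omega)
          · simp only [hd, if_false]
            exact (ih cs (i + 1) (out ++ String.ofList [cs.getD i ' ']) (by omega)).1 f (by omega)
      · -- IN_QUOTE state vs A's inner loop
        intro q lit fi fo hfi hfo
        obtain ⟨f, rfl⟩ : ∃ f, fi = f + 1 := ⟨fi - 1, by omega⟩
        rw [aInner]
        simp only [hi, if_true]
        by_cases hcq : cs.getD i ' ' = q
        · -- closing quote
          subst hcq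
          rw [if_pos rfl]
          dsimp only
          rw [if_pos (⟨hi, rfl⟩ : i < cs.length ∧ cs.getD i ' ' = cs.getD i ' ')]
          rw [hdrop]
          simp only [bGo, if_true]
          rw [decode_eq]
          exact (ih cs (i + 1) (out ++ bDecode lit) (by omega)).1 fo (by omega)
        · rw [if_neg hcq]
          by_cases hesc : cs.getD i ' ' = '\\' ∧ i + 1 < cs.length
          · -- escape with a following character
            rw [if_pos hesc]
            have h2 := drop_cons_getD cs (i + 1) hesc.2
            rw [hdrop, h2]
            simp only [bGo]
            rw [if_neg hcq, if_pos hesc.1]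
            have := (ih cs (i + 2) out (by omega)).2 q
              (lit ++ [cs.getD i ' ', cs.getD (i + 1) ' ']) f fo (by omega) (by omega)
            have h12 : i + 1 + 1 = i + 2 := rfl
            simpa [List.append_assoc, h12] using this
          · rw [if_neg hesc]
            by_cases hbs : cs.getD i ' ' = '\\'
            · -- backslash as the last character of the string
              have hend : ¬ i + 1 < cs.length := fun hlt => hesc ⟨hbs, hlt⟩
              have hdrop1 : cs.drop (i + 1) = [] := List.drop_eq_nil_of_le (by omega)
              rw [aInner_out cs q f (i + 1) _ hend]
              dsimp only
              rw [if_neg (show ¬ (i + 1 < cs.length ∧ cs.getD (i + 1) ' ' = q) from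
                fun hc => hend hc.1)]
              rw [aLoop_out cs fo (i + 1) _ hend]
              rw [hdrop, hdrop1]
              simp only [bGo]
              rw [if_neg hcq, if_pos hbs]
              simp [decode_eq]
            · -- ordinary character inside the literal
              rw [hdrop]
              simp only [bGo]
              rw [if_neg hcq, if_neg hbs]
              exact (ih cs (i + 1) out (by omega)).2 q (lit ++ [cs.getD i ' ']) f fo
                (by omega) (by omega)
    · have hdrop : cs.drop i = [] := List.drop_eq_nil_of_le (by omega)
      constructor
      · intro fuel _
        rw [aLoop_out cs fuel i out hi]
        simp [hdrop, bGo]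
      · intro q lit fi fo _ _
        rw [aInner_out cs q fi i lit hi]
        dsimp only
        rw [if_neg (fun hc => hi hc.1), aLoop_out cs fo i _ hi]
        simp [hdrop, bGo, decode_eq]

-- ===== VERDICT (by name: the statement is the Claim_ definition above) =====
theorem convert_char_literals_to_ascii_spec : Claim_equal_convert_char_literals_to_ascii := by
  intro regex _
  unfold Spec_convert_char_literals_to_ascii convert_char_literals_to_ascii convert_char_literals_to_ascii_alt
  have := (loops_eq regex.toList.length regex.toList 0 "" (by omega)).1
    (regex.toList.length + 1) (by omega)
  simpa using this
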